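-- pv_equiv track=rewrite | github.com/ducleh/Huy_Duc_Le_SAT | clique_cover.py | decode_cliques
-- ===== SOURCE A (Python) =====
-- def decode_cliques(model, k):
--     cliques = {i: [] for i in range(1, k + 1)}
--
--     for var in model:
--         if var > 0:
--             v = (var - 1) // k + 1
--             c = (var - 1) % k + 1
--             cliques[c].append(v)
--
--     return cliques
-- ===== SOURCE B (Python) =====
-- def decode_cliques(model, k):
--     return {
--         c: [(var - 1) // k + 1 for var in model if var > 0 and (var - 1) % k + 1 == c]
--         for c in range(1, k + 1)
--     }
-- ===== Notes on version B (the rewrite author's own statement) =====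
-- stated objective: alternative
-- what changed: Replaced the single scatter pass that distributes positive variables into pre-built dict buckets with a dict comprehension that, for each clique index c in 1..k, makes its own filtering gather pass over the model (scan-per-bucket instead of distribute-into-buckets).
import Mathlib
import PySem

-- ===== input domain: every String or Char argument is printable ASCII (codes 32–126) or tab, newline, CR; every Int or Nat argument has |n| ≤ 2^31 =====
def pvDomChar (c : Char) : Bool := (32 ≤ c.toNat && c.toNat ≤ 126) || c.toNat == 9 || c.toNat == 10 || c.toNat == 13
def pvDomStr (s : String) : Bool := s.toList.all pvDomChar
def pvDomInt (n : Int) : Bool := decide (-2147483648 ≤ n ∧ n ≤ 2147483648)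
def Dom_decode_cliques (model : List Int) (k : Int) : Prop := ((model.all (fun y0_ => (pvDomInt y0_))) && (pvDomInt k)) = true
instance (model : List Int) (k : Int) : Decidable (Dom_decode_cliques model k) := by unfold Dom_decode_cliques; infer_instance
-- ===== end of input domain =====

-- B replaces A's single scatter pass (distribute each positive var into its bucket) with one
-- filtering gather pass over the model per clique index ("alternative" decomposition, not faster).

-- ===== PORT A =====
def decode_cliques (model : List Int) (k : Int) : List (Int × List Int) :=
  let cliques : PySem.Dict Int (List Int) :=
    (PySem.List.pyRange 1 (k + 1) 1).foldl (fun d i => d.insert i []) (PySem.Dict.mk [])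
  let cliques := model.foldl (fun d var =>
      if var > 0 then
        let v := PySem.Int.floordiv (var - 1) k + 1
        let c := PySem.Int.mod (var - 1) k + 1
        d.modify c [] (fun l => l ++ [v])
      else d) cliques
  cliques.items

-- ===== PORT B =====
def decode_cliques_alt (model : List Int) (k : Int) : List (Int × List Int) :=
  (PySem.List.pyRange 1 (k + 1) 1).map (fun c =>
    (c, model.filterMap (fun var =>
          if var > 0 ∧ PySem.Int.mod (var - 1) k + 1 = c
          then some (PySem.Int.floordiv (var - 1) k + 1) else none)))

-- ===== PRECONDITION & SPEC =====
-- Pre_ excludes exactly the inputs where A raises: k ≤ 0 together with a positive model variable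
-- (ZeroDivisionError for k = 0, KeyError on the empty bucket dict for k < 0).
def Pre_decode_cliques (model : List Int) (k : Int) : Prop :=
  0 < k ∨ ∀ v ∈ model, v ≤ 0
instance (model : List Int) (k : Int) : Decidable (Pre_decode_cliques model k) := by unfold Pre_decode_cliques; infer_instance
def pvWitness_decode_cliques : List Int × Int := ([3, -1, 5, 2], 2)

def Spec_decode_cliques (model : List Int) (k : Int) (out : List (Int × List Int)) : Prop := out = decode_cliques_alt model k
instance (model : List Int) (k : Int) (out : List (Int × List Int)) : Decidable (Spec_decode_cliques model k out) := by unfold Spec_decode_cliques; infer_instance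

-- ===== CLAIM (what is proved, stated in full; the proofs are below) =====
def Claim_equal_decode_cliques : Prop := ∀ (model : List Int) (k : Int), Dom_decode_cliques model k → Pre_decode_cliques model k → Spec_decode_cliques model k (decode_cliques model k)
-- ===== LEMMAS AND PROOFS =====

-- getD on an association list built as a map over its (not necessarily distinct) keys
theorem pv_getD_mk_map {g : Int → List Int} {dflt : List Int} (l : List Int) (c0 : Int)
    (h : c0 ∈ l) : (PySem.Dict.mk (l.map (fun c => (c, g c)))).getD c0 dflt = g c0 := by
  induction l with
  | nil => cases h
  | cons a t ih =>
    by_cases hac : a = c0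
    · subst hac
      simp [PySem.Dict.getD, PySem.Dict.get?]
    · have h' : c0 ∈ t := by
        rcases List.mem_cons.mp h with h1 | h1
        · exact absurd h1.symm hac
        · exact h1
      have := ih h'
      simpa [PySem.Dict.getD, PySem.Dict.get?, List.find?, hac] using this

-- insert of a present key rewrites the bucket in place
theorem pv_insert_mk_map {g : Int → List Int} (l : List Int) (c0 : Int) (w : List Int)
    (h : c0 ∈ l) :
    (PySem.Dict.mk (l.map (fun c => (c, g c)))).insert c0 w
      = PySem.Dict.mk (l.map (fun c => (c, if c = c0 then w else g c))) := by
  have hcont : (PySem.Dict.mk (l.map (fun c => (c, g c)))).contains c0 = true := by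
    simp only [PySem.Dict.contains, List.any_map]
    rw [List.any_eq_true]
    exact ⟨c0, h, by simp⟩
  simp only [PySem.Dict.insert, hcont, if_pos]
  congr 1
  rw [List.map_map]
  apply List.map_congr_left
  intro c _
  by_cases hc : c = c0 <;> simp [hc]

-- the initial {i: [] for i in range(1, k+1)} build
theorem pv_init_build (l : List Int) (hnd : l.Nodup) (d : PySem.Dict Int (List Int))
    (h : ∀ i ∈ l, d.contains i = false) :
    l.foldl (fun d i => d.insert i ([] : List Int)) d
      = PySem.Dict.mk (d.items ++ l.map (fun c => (c, ([] : List Int)))) := by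
  induction l generalizing d with
  | nil => simp
  | cons a t ih =>
    have ha : d.contains a = false := h a (List.mem_cons_self ..)
    have hins : d.insert a ([] : List Int) = PySem.Dict.mk (d.items ++ [(a, ([] : List Int))]) := by
      simp [PySem.Dict.insert, ha]
    have hrest : ∀ i ∈ t, (PySem.Dict.mk (d.items ++ [(a, ([] : List Int))])).contains i = false := by
      intro i hi
      have hne : ¬ (a = i) := fun he => (List.nodup_cons.mp hnd).1 (he ▸ hi)
      have hdi := h i (List.mem_cons_of_mem _ hi)
      simp [PySem.Dict.contains, List.any_append] at hdi ⊢
      exact ⟨hdi, hne⟩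
    calc (a :: t).foldl (fun d i => d.insert i ([] : List Int)) d
        = t.foldl (fun d i => d.insert i ([] : List Int)) (PySem.Dict.mk (d.items ++ [(a, ([] : List Int))])) := by
          simp [List.foldl_cons, hins]
      _ = PySem.Dict.mk ((d.items ++ [(a, ([] : List Int))]) ++ t.map (fun c => (c, ([] : List Int)))) := ih (List.nodup_cons.mp hnd).2 _ hrest
      _ = PySem.Dict.mk (d.items ++ (a :: t).map (fun c => (c, ([] : List Int)))) := by
          simp

-- positive variables of a model with k > 0 always hit a key of range(1, k+1)
theorem pv_key_mem (k : Int) (hk : 0 < k) (var : Int) :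
    PySem.Int.mod (var - 1) k + 1 ∈ PySem.List.pyRange 1 (k + 1) 1 := by
  rw [PySem.List.mem_pyRange_one]
  rw [PySem.Int.mod_eq_emod_of_pos hk]
  have h1 := Int.emod_nonneg (var - 1) (by omega : k ≠ 0)
  have h2 := Int.emod_lt_of_pos (var - 1) hk
  omega

-- main loop invariant: scatter over a range-keyed dict = per-key gather
theorem pv_main (k : Int) (hk : 0 < k) (model : List Int) (g : Int → List Int) :
    (model.foldl (fun d var =>
        if var > 0 then
          d.modify (PySem.Int.mod (var - 1) k + 1) []
            (fun l => l ++ [PySem.Int.floordiv (var - 1) k + 1])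
        else d)
      (PySem.Dict.mk ((PySem.List.pyRange 1 (k + 1) 1).map (fun c => (c, g c))))).items
    = (PySem.List.pyRange 1 (k + 1) 1).map (fun c =>
        (c, g c ++ model.filterMap (fun var =>
              if var > 0 ∧ PySem.Int.mod (var - 1) k + 1 = c
              then some (PySem.Int.floordiv (var - 1) k + 1) else none))) := by
  induction model generalizing g with
  | nil => simp
  | cons var rest ih =>
    by_cases hv : var > 0
    · have hmem := pv_key_mem k hk var
      set c0 := PySem.Int.mod (var - 1) k + 1 with hc0
      set v := PySem.Int.floordiv (var - 1) k + 1 with hval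
      have hstep : (PySem.Dict.mk ((PySem.List.pyRange 1 (k + 1) 1).map (fun c => (c, g c)))).modify c0 []
            (fun l => l ++ [v])
          = PySem.Dict.mk ((PySem.List.pyRange 1 (k + 1) 1).map
              (fun c => (c, if c = c0 then g c0 ++ [v] else g c))) := by
        rw [PySem.Dict.modify, pv_getD_mk_map _ _ hmem, pv_insert_mk_map _ _ _ hmem]
      rw [List.foldl_cons]
      simp only [hv, if_pos]
      rw [hstep, ih (fun c => if c = c0 then g c0 ++ [v] else g c)]
      apply List.map_congr_left
      intro c _
      by_cases hc : c = c0
      · subst hc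
        simp [hv, ← hc0, hval]
      · have hne : ¬ (c0 = c) := fun h => hc h.symm
        simp [hv, hne, hc, ← hc0]
    · rw [List.foldl_cons]
      simp only [hv, if_false]
      rw [ih g]
      apply List.map_congr_left
      intro c _
      simp [hv]

-- a model without positive variables leaves the dict untouched
theorem pv_nopos (model : List Int) (hm : ∀ v ∈ model, v ≤ 0) (k : Int)
    (d : PySem.Dict Int (List Int)) :
    model.foldl (fun d var =>
        if var > 0 then
          d.modify (PySem.Int.mod (var - 1) k + 1) []
            (fun l => l ++ [PySem.Int.floordiv (var - 1) k + 1])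
        else d) d = d := by
  induction model with
  | nil => rfl
  | cons a t ih =>
    have ha : ¬ a > 0 := by have := hm a (List.mem_cons_self ..); omega
    rw [List.foldl_cons]
    simp only [ha, if_false]
    exact ih (fun v hv => hm v (List.mem_cons_of_mem _ hv))

-- ===== VERDICT (by name: the statement is the Claim_ definition above) =====
theorem decode_cliques_spec : Claim_equal_decode_cliques := by
  intro model k _ hpre
  unfold Spec_decode_cliques decode_cliques decode_cliques_alt
  have hinit : (PySem.List.pyRange 1 (k + 1) 1).foldl (fun d i => d.insert i ([] : List Int)) (PySem.Dict.mk [])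
      = PySem.Dict.mk ((PySem.List.pyRange 1 (k + 1) 1).map (fun c => (c, ([] : List Int)))) := by
    rw [pv_init_build _ (PySem.List.nodup_pyRange_one 1 (k+1)) _ (by intro i _; simp [PySem.Dict.contains])]
    simp
  by_cases hk : 0 < k
  · simp only [hinit]
    rw [pv_main k hk model (fun _ => ([] : List Int))]
    simp
  · have hm : ∀ v ∈ model, v ≤ 0 := by
      rcases hpre with h | h
      · exact absurd h hk
      · exact h
    have hr : PySem.List.pyRange 1 (k + 1) 1 = [] := PySem.List.pyRange_one_eq_nil (by omega)
    simp only [hr, List.map_nil]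
    rw [pv_nopos model hm k]
    simp
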